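-- pv_equiv track=rewrite | github.com/lucainiaoge/jazzify | rules/chord2symbol.py | inv_invert_no_chrma24
-- ===== SOURCE A (Python) =====
-- from typing import Tuple, List, Dict, Optional
--
-- def inv_invert_no_chrma24(note_list:List[int], time_inversion:int = 1):
--     def inv_invert_inner_loop(note_list:List[int]):
--         if len(note_list) <= 1:
--             return note_list
--         note_list.sort()
--         new_note_list = [note for note in note_list[0:-1]]
--         prev_bass = note_list[0]
--         new_bass = note_list[-1]
--         while new_bass >= prev_bass:
--             new_bass -= 12
--         new_note_list.insert(0,new_bass)
--         return new_note_list
--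
--     new_note_list = note_list[:]
--     for _ in range(time_inversion):
--         new_note_list = inv_invert_inner_loop(new_note_list)
--     return new_note_list
-- ===== SOURCE B (Python) =====
-- def inv_invert_no_chrma24(note_list, time_inversion=1):
--     # Sort once (each inversion keeps the list sorted), then do every
--     # inversion in O(1) on a circular buffer instead of re-sorting.
--     n = len(note_list)
--     if n <= 1 or time_inversion <= 0:
--         return note_list[:]
--     arr = sorted(note_list)
--     j = 0
--     for _ in range(time_inversion):
--         i = (j - 1) % n
--         top = arr[i]
--         bottom = arr[j]
--         arr[i] = top - 12 * ((top - bottom) // 12 + 1)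
--         j = i
--     return arr[j:] + arr[:j]
-- ===== Notes on version B (the rewrite author's own statement) =====
-- stated objective: faster
-- what changed: A re-sorts the whole chord on every inversion step; B sorts once (each inversion keeps the list sorted) and performs every inversion in O(1) on a circular buffer with modular index arithmetic, rotating the result out at the end.
import Mathlib
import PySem

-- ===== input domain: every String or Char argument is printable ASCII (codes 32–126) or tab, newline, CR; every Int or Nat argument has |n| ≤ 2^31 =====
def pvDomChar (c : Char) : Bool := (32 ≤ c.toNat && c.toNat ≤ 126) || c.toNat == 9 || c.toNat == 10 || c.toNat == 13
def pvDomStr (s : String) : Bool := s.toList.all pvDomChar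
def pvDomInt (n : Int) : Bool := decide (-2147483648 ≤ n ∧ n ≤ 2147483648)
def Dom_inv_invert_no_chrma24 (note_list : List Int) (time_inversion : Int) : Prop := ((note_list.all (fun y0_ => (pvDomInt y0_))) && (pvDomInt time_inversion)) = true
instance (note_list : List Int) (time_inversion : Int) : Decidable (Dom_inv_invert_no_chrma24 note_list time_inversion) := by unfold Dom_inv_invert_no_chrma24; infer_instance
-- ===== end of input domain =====

-- B sorts once and performs each inversion in O(1) on a circular buffer; A re-sorts on every inversion.

-- ===== PORT A =====
-- while new_bass >= prev_bass: new_bass -= 12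
def pvLower (b p : Int) : Int :=
  if b ≥ p then pvLower (b - 12) p else b
termination_by (b - p + 12).toNat
decreasing_by omega

-- def inv_invert_inner_loop(note_list)
def pvInner (l : List Int) : List Int :=
  if l.length ≤ 1 then l
  else
    let s := PySem.List.sorted l (fun x => x) false
    let new_note_list := (PySem.List.slice s (some 0) (some (-1))).map (fun note => note)
    let prev_bass := PySem.List.pyGetD s 0 0
    let new_bass := pvLower (PySem.List.pyGetD s (-1) 0) prev_bass
    new_bass :: new_note_list

def inv_invert_no_chrma24 (note_list : List Int) (time_inversion : Int) : List Int :=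
  (List.range time_inversion.toNat).foldl (fun acc _ => pvInner acc) note_list

-- ===== PORT B =====
-- one inversion step of Source B's loop body on the circular buffer state (arr, j)
def pvStepB (n : Int) (st : List Int × Int) : List Int × Int :=
  let (arr, j) := st
  let i := PySem.Int.mod (j - 1) n
  let top := PySem.List.pyGetD arr i 0
  let bottom := PySem.List.pyGetD arr j 0
  (PySem.List.pySetD arr i (top - 12 * (PySem.Int.floordiv (top - bottom) 12 + 1)), i)

def inv_invert_no_chrma24_alt (note_list : List Int) (time_inversion : Int) : List Int :=
  let n : Int := note_list.length
  if n ≤ 1 ∨ time_inversion ≤ 0 then note_list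
  else
    let arr0 := PySem.List.sorted note_list (fun x => x) false
    let st := (List.range time_inversion.toNat).foldl (fun st _ => pvStepB n st) (arr0, 0)
    PySem.List.slice st.1 (some st.2) none ++ PySem.List.slice st.1 none (some st.2)

-- ===== PRECONDITION & SPEC =====
def Spec_inv_invert_no_chrma24 (note_list : List Int) (time_inversion : Int) (out : List Int) : Prop := out = inv_invert_no_chrma24_alt note_list time_inversion
instance (note_list : List Int) (time_inversion : Int) (out : List Int) : Decidable (Spec_inv_invert_no_chrma24 note_list time_inversion out) := by unfold Spec_inv_invert_no_chrma24; infer_instance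

-- ===== CLAIM (what is proved, stated in full; the proofs are below) =====
def Claim_equal_inv_invert_no_chrma24 : Prop := ∀ (note_list : List Int) (time_inversion : Int), Dom_inv_invert_no_chrma24 note_list time_inversion → Spec_inv_invert_no_chrma24 note_list time_inversion (inv_invert_no_chrma24 note_list time_inversion)

-- ===== LEMMAS AND PROOFS =====

-- abstract inversion step on the current (sorted) chord
def pvStep (l : List Int) : List Int :=
  pvLower (PySem.List.pyGetD l (-1) 0) (PySem.List.pyGetD l 0 0) :: l.dropLast

-- k abstract steps
def pvIter (k : Nat) (l : List Int) : List Int :=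
  match k with
  | 0 => l
  | k + 1 => pvStep (pvIter k l)

-- the chord B's circular state (arr, j) denotes
def pvRot (arr : List Int) (j : Nat) : List Int := arr.drop j ++ arr.take j

lemma pvLower_lt (b p : Int) : pvLower b p < p := by
  fun_induction pvLower b p with
  | case1 b h ih => exact ih
  | case2 b h => omega

lemma pvLower_closed (b p : Int) (h : p ≤ b) :
    pvLower b p = b - 12 * (PySem.Int.floordiv (b - p) 12 + 1) := by
  rw [PySem.Int.floordiv_eq_ediv_of_pos (by omega)]
  revert h
  fun_induction pvLower b p with
  | case1 b hge ih =>
      intro h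
      by_cases h2 : p ≤ b - 12
      · rw [ih h2]; omega
      · rw [pvLower, if_neg (by omega)]; omega
  | case2 b hge => omega

lemma pvInner_short (l : List Int) (h : l.length ≤ 1) : pvInner l = l := by
  simp [pvInner, h]

-- A's inner loop is: sort, then one abstract step
lemma pvInner_eq_step_sorted (l : List Int) (hl : 2 ≤ l.length) :
    pvInner l = pvStep (PySem.List.sorted l (fun x => x) false) := by
  rw [pvInner, if_neg (by omega)]
  simp [pvStep, PySem.List.slice_to_neg_one]

lemma pvInner_sorted (l : List Int) (hs : l.Pairwise (· ≤ ·)) (hl : 2 ≤ l.length) :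
    pvInner l = pvStep l := by
  have hsort_eq : PySem.List.sorted l (fun x => x) false = l :=
    PySem.List.sorted_eq_self_of_pairwise l (fun x => x) hs
  rw [pvInner_eq_step_sorted l hl, hsort_eq]

lemma pvStep_length (l : List Int) (hl : 1 ≤ l.length) : (pvStep l).length = l.length := by
  simp [pvStep]; omega

lemma pvStep_pairwise (l : List Int) (hs : l.Pairwise (· ≤ ·)) (hl : 2 ≤ l.length) :
    (pvStep l).Pairwise (· ≤ ·) := by
  obtain ⟨a, t, rfl⟩ : ∃ a t, l = a :: t := by
    cases l with
    | nil => simp at hl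
    | cons a t => exact ⟨a, t, rfl⟩
  rw [pvStep, List.pairwise_cons]
  have hlt : pvLower (PySem.List.pyGetD (a :: t) (-1) 0) (PySem.List.pyGetD (a :: t) 0 0) < a := by
    rw [PySem.List.pyGetD_zero_cons]; exact pvLower_lt _ _
  refine ⟨fun x hx => ?_, hs.sublist (List.dropLast_sublist _)⟩
  have hx' : x ∈ a :: t := (List.dropLast_sublist (a :: t)).subset hx
  rcases List.mem_cons.mp hx' with rfl | hx'
  · omega
  · have := (List.pairwise_cons.mp hs).1 x hx'
    omega

lemma pvIter_length (k : Nat) (l : List Int) (hl : 2 ≤ l.length) :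
    (pvIter k l).length = l.length := by
  induction k with
  | zero => rfl
  | succ k ih => rw [pvIter, pvStep_length _ (by omega), ih]

lemma pvIter_pairwise (k : Nat) (l : List Int) (hs : l.Pairwise (· ≤ ·)) (hl : 2 ≤ l.length) :
    (pvIter k l).Pairwise (· ≤ ·) := by
  induction k with
  | zero => exact hs
  | succ k ih => exact pvStep_pairwise _ ih (by rw [pvIter_length k l hl]; exact hl)

lemma pvIter_succ_outer (k : Nat) (l : List Int) : pvIter (k + 1) l = pvIter k (pvStep l) := by
  induction k with
  | zero => rfl
  | succ k ih => rw [pvIter, ih, pvIter]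

-- A's loop on a sorted list of length >= 2 is pvIter
lemma a_fold (k : Nat) (l : List Int) (hs : l.Pairwise (· ≤ ·)) (hl : 2 ≤ l.length) :
    (List.range k).foldl (fun acc _ => pvInner acc) l = pvIter k l := by
  induction k with
  | zero => rfl
  | succ k ih =>
      rw [List.range_succ, List.foldl_append, ih, List.foldl_cons, List.foldl_nil]
      exact pvInner_sorted _ (pvIter_pairwise k l hs hl) (by rw [pvIter_length k l hl]; exact hl)

-- rotating a one-point update
lemma pvRot_set (arr : List Int) (m : Nat) (v : Int) (h : m < arr.length) :
    pvRot (arr.set m v) m = v :: (arr.drop (m + 1) ++ arr.take m) := by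
  rw [pvRot, List.set_eq_take_append_cons_drop, if_pos h]
  rw [List.drop_append_of_le_length (by simp; omega),
      List.take_append_of_le_length (by simp; omega)]
  simp [List.take_take]

lemma sorted_first_le_last (l : List Int) (hs : l.Pairwise (· ≤ ·)) (h2 : 2 ≤ l.length) :
    l[0]'(by omega) ≤ l[l.length - 1]'(by omega) :=
  List.pairwise_iff_getElem.mp hs 0 (l.length - 1) (by omega) (by omega) (by omega)

-- one step of B advances the denoted chord by pvStep
lemma b_step (arr : List Int) (j : Nat) (h2 : 2 ≤ arr.length) (hj : j < arr.length)
    (hs : (pvRot arr j).Pairwise (· ≤ ·)) :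
    ∃ (arr' : List Int) (j' : Nat), pvStepB (arr.length : Int) (arr, (j : Int)) = (arr', (j' : Int)) ∧
      arr'.length = arr.length ∧ j' < arr.length ∧ pvRot arr' j' = pvStep (pvRot arr j) := by
  have hnpos : (0 : Int) < (arr.length : Int) := by omega
  cases j with
  | zero =>
      -- i = (0 - 1) mod arr.length = arr.length - 1; the rotation is arr itself
      have hrot : pvRot arr 0 = arr := by simp [pvRot]
      rw [hrot] at hs
      have hmod : PySem.Int.mod (((0 : Nat) : Int) - 1) (arr.length : Int) = ((arr.length - 1 : Nat) : Int) := by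
        rw [PySem.Int.mod_eq_emod_of_pos hnpos]
        have h1 : (((0 : Nat) : Int) - 1 + (arr.length : Int) * 1) % (arr.length : Int)
            = (((0 : Nat) : Int) - 1) % (arr.length : Int) :=
          Int.add_mul_emod_self_left (((0 : Nat) : Int) - 1) (arr.length : Int) 1
        have h2' : (((0 : Nat) : Int) - 1 + (arr.length : Int) * 1) % (arr.length : Int)
            = ((0 : Nat) : Int) - 1 + (arr.length : Int) * 1 :=
          Int.emod_eq_of_lt (by omega) (by omega)
        omega
      have hne : arr ≠ [] := by intro h; rw [h] at h2; simp at h2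
      have hdlt : arr.take (arr.length - 1) = arr.dropLast := List.take_eq_dropLast (by omega)
      have hconcat : arr.dropLast ++ [arr[arr.length - 1]'(by omega)] = arr := by
        have h := List.dropLast_append_getLast hne
        rw [List.getLast_eq_getElem] at h
        exact h
      have hble : arr[0]'(by omega) ≤ arr[arr.length - 1]'(by omega) := by
        exact sorted_first_le_last arr hs (by omega)
      refine ⟨arr.set (arr.length - 1) (arr[arr.length - 1]'(by omega) -
          12 * (PySem.Int.floordiv (arr[arr.length - 1]'(by omega) - arr[0]'(by omega)) 12 + 1)),
        arr.length - 1, ?_, by simp, by omega, ?_⟩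
      · rw [pvStepB]
        simp only [hmod]
        rw [PySem.List.pyGetD_eq_getElem _ _ (by omega) (by omega),
            PySem.List.pyGetD_eq_getElem _ _ (by omega) (by omega),
            PySem.List.pySetD_natCast]
        simp
      · rw [pvRot_set _ _ _ (by omega), hrot, pvStep]
        rw [show PySem.List.pyGetD arr (-1) 0 = arr[arr.length - 1]'(by omega) from by
          conv_lhs => rw [← hconcat]
          rw [PySem.List.pyGetD_neg_one_append_singleton]]
        rw [PySem.List.pyGetD_zero, List.getD_eq_getElem _ _ (by omega),
            pvLower_closed _ _ hble]
        have hd : arr.drop (arr.length - 1 + 1) = [] := List.drop_eq_nil_of_le (by omega)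
        rw [hd, List.nil_append, hdlt]
        norm_num
  | succ m =>
      -- i = m; the rotation is drop (m+1) ++ take (m+1)
      have hmod : PySem.Int.mod (((m + 1 : Nat) : Int) - 1) (arr.length : Int) = ((m : Nat) : Int) := by
        rw [PySem.Int.mod_eq_emod_of_pos hnpos]
        have h1 : (((m + 1 : Nat) : Int) - 1) % (arr.length : Int) = ((m + 1 : Nat) : Int) - 1 :=
          Int.emod_eq_of_lt (by omega) (by omega)
        omega
      have htake : arr.take (m + 1) = arr.take m ++ [arr[m]'(by omega)] := by
        rw [List.take_add_one]
        congr 1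
        rw [List.getElem?_eq_getElem (by omega)]
        rfl
      have hdropc : arr.drop (m + 1) = arr[m + 1]'(by omega) :: arr.drop (m + 2) :=
        List.drop_eq_getElem_cons (by omega)
      have hsplit : pvRot arr (m + 1)
          = (arr.drop (m + 1) ++ arr.take m) ++ [arr[m]'(by omega)] := by
        rw [pvRot, htake, ← List.append_assoc]
      have hsplit2 : pvRot arr (m + 1)
          = arr[m + 1]'(by omega) :: (arr.drop (m + 2) ++ arr.take (m + 1)) := by
        rw [pvRot, hdropc, List.cons_append]
      have hble : arr[m + 1]'(by omega) ≤ arr[m]'(by omega) := by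
        have h := sorted_first_le_last (pvRot arr (m + 1)) hs (by simp [pvRot]; omega)
        have hlen : (pvRot arr (m + 1)).length = arr.length := by simp [pvRot]; omega
        have hfst : (pvRot arr (m + 1))[0]'(by omega) = arr[m + 1]'(by omega) := by
          simp [hsplit2]
        have hlst : (pvRot arr (m + 1))[(pvRot arr (m + 1)).length - 1]'(by omega)
            = arr[m]'(by omega) := by
          have hll : ((arr.drop (m + 1) ++ arr.take m)).length = arr.length - 1 := by
            simp; omega
          rw [List.getElem_of_eq hsplit]
          rw [List.getElem_append_right (by simp; omega)]
          simp
        rw [hfst, hlst] at h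
        exact h
      refine ⟨arr.set m (arr[m]'(by omega) -
          12 * (PySem.Int.floordiv (arr[m]'(by omega) - arr[m + 1]'(by omega)) 12 + 1)),
        m, ?_, by simp, by omega, ?_⟩
      · rw [pvStepB]
        simp only [hmod]
        rw [PySem.List.pyGetD_eq_getElem _ _ (by omega) (by omega),
            PySem.List.pyGetD_eq_getElem _ _ (by omega) (by omega),
            PySem.List.pySetD_natCast]
        simp
      · rw [pvRot_set _ _ _ (by omega), pvStep]
        rw [show PySem.List.pyGetD (pvRot arr (m + 1)) (-1) 0 = arr[m]'(by omega) from by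
          rw [hsplit, PySem.List.pyGetD_neg_one_append_singleton]]
        rw [show PySem.List.pyGetD (pvRot arr (m + 1)) 0 0 = arr[m + 1]'(by omega) from by
          rw [hsplit2, PySem.List.pyGetD_zero_cons]]
        rw [pvLower_closed _ _ hble]
        rw [show (pvRot arr (m + 1)).dropLast = arr.drop (m + 1) ++ arr.take m from by
          rw [hsplit, List.dropLast_concat]]

-- B's loop maintains the invariant
lemma b_fold (k : Nat) (n : Nat) (arr : List Int) (j : Nat) (hn : arr.length = n) (h2 : 2 ≤ n)
    (hj : j < n) (hs : (pvRot arr j).Pairwise (· ≤ ·)) :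
    ∃ (arr' : List Int) (j' : Nat),
      (List.range k).foldl (fun st _ => pvStepB (n : Int) st) (arr, (j : Int)) = (arr', (j' : Int)) ∧
      arr'.length = n ∧ j' < n ∧ pvRot arr' j' = pvIter k (pvRot arr j) := by
  induction k with
  | zero => exact ⟨arr, j, rfl, hn, hj, rfl⟩
  | succ k ih =>
      obtain ⟨a1, j1, heq, hn1, hj1, hrot1⟩ := ih
      have hs1 : (pvRot a1 j1).Pairwise (· ≤ ·) := by
        rw [hrot1]
        exact pvIter_pairwise k _ hs (by simp [pvRot]; omega)
      obtain ⟨a2, j2, heq2, hn2, hj2, hrot2⟩ :=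
        b_step a1 j1 (by omega) (by omega) hs1
      rw [hn1] at heq2 hn2 hj2
      refine ⟨a2, j2, ?_, hn2, hj2, ?_⟩
      · rw [List.range_succ, List.foldl_append, heq, List.foldl_cons, List.foldl_nil, heq2]
      · rw [hrot2, hrot1, pvIter]

-- main theorem pieces
lemma a_short (k : Nat) (l : List Int) (h : l.length ≤ 1) :
    (List.range k).foldl (fun acc _ => pvInner acc) l = l := by
  induction k with
  | zero => rfl
  | succ k ih => rw [List.range_succ, List.foldl_append, ih, List.foldl_cons, List.foldl_nil,
      pvInner_short l h]

-- ===== VERDICT (by name: the statement is the Claim_ definition above) =====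
theorem inv_invert_no_chrma24_spec : Claim_equal_inv_invert_no_chrma24 := by
  intro l t _
  unfold Spec_inv_invert_no_chrma24 inv_invert_no_chrma24 inv_invert_no_chrma24_alt
  by_cases hcond : (l.length : Int) ≤ 1 ∨ t ≤ 0
  · rw [if_pos hcond]
    rcases hcond with h | h
    · exact a_short _ l (by exact_mod_cast h)
    · have : t.toNat = 0 := by omega
      rw [this]
      rfl
  · rw [if_neg hcond]
    have h1 : ¬ ((l.length : Int) ≤ 1) := fun h => hcond (Or.inl h)
    have h2 : ¬ (t ≤ 0) := fun h => hcond (Or.inr h)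
    have hl2 : 2 ≤ l.length := by omega
    have hex : ∃ k : Nat, t.toNat = k + 1 := ⟨t.toNat - 1, by omega⟩
    obtain ⟨k, hk⟩ := hex
    set s := PySem.List.sorted l (fun x => x) false with hsdef
    have hslen : s.length = l.length := PySem.List.length_sorted l (fun x => x) false
    have hssort : s.Pairwise (· ≤ ·) := PySem.List.sorted_pairwise l (fun x => x)
    -- A's side
    have ha : (List.range t.toNat).foldl (fun acc _ => pvInner acc) l = pvIter t.toNat s := by
      rw [hk, List.range_succ_eq_map, List.foldl_cons, List.foldl_map,
          pvInner_eq_step_sorted l hl2, ← hsdef]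
      rw [a_fold k (pvStep s) (pvStep_pairwise s hssort (by omega))
            (by rw [pvStep_length s (by omega)]; omega)]
      rw [← pvIter_succ_outer]
    rw [ha]
    -- B's side
    have hrot0 : pvRot s 0 = s := by simp [pvRot]
    have hb := b_fold t.toNat l.length s 0 (by omega) hl2 (by omega) (by rw [hrot0]; exact hssort)
    obtain ⟨arr', j', heq, hn', hj', hrot'⟩ := hb
    simp only [Nat.cast_zero] at heq
    simp only [heq, PySem.List.slice_from_natCast arr' j', PySem.List.slice_to_natCast arr' j']
    rw [hrot0] at hrot'
    exact hrot'.symm
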